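-- pv_equiv track=rewrite | github.com/heinrich5991/libtw2 | gamenet/src/generate_msg.py | generate_structs
-- ===== SOURCE A (Python) =====
-- def struct_name(name):
--     return name.title().replace('_', '')
--
-- def rust_type(type_, optional):
--     if type_ == 'string':
--         result = "&'a [u8]"
--     elif type_ == 'integer':
--         result = "i32"
--     elif type_ == 'data':
--         result = "&'a [u8]"
--     elif type_ == 'integer_data':
--         result = "IntegerData<'a>"
--     else:
--         raise ValueError("Invalid type: {}".format(type_))
--     if not optional:
--         return result
--     else:
--         return "Option<{}>".format(result)
--
-- def lifetime(members):
--     for type_, _, _ in members: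
--         if "'a" in rust_type(type_, False):
--             return "<'a>"
--     return ""
--
-- def generate_structs(msgs):
--     result = []
--     for _, name, members in msgs:
--         result.append("    #[derive(Clone, Copy)]")
--         if members:
--             result.append("    pub struct {}{} {{".format(struct_name(name), lifetime(members)))
--             for type_, opt, name in members:
--                 result.append("        pub {}: {},".format(name, rust_type(type_, opt)))
--             result.append("    }")
--         else:
--             result.append("    pub struct {};".format(struct_name(name)))
--         result.append("")
--     return "\n".join(result)
-- ===== SOURCE B (Python) =====
-- TYPES = {
--     'string': "&'a [u8]",
--     'integer': "i32",
--     'data': "&'a [u8]",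
--     'integer_data': "IntegerData<'a>",
-- }
--
-- def struct_name(name):
--     # single pass: title-case while dropping underscores
--     out = []
--     prev_alpha = False
--     for c in name:
--         if c == '_':
--             prev_alpha = False
--             continue
--         if c.isalpha():
--             out.append(c.lower() if prev_alpha else c.upper())
--             prev_alpha = True
--         else:
--             out.append(c)
--             prev_alpha = False
--     return ''.join(out)
--
-- def generate_structs(msgs):
--     blocks = []
--     for _, name, members in msgs:
--         sn = struct_name(name)
--         head = "    #[derive(Clone, Copy)]\n"
--         if members:
--             lt = ""
--             body = ""
--             for type_, opt, fname in members:
--                 base = TYPES[type_]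
--                 if "'a" in base:
--                     lt = "<'a>"
--                 ty = "Option<{}>".format(base) if opt else base
--                 body += "        pub {}: {},\n".format(fname, ty)
--             blocks.append(head + "    pub struct {}{} {{\n".format(sn, lt) + body + "    }\n")
--         else:
--             blocks.append(head + "    pub struct {};\n".format(sn))
--     return "\n".join(blocks)
-- ===== Notes on version B (the rewrite author's own statement) =====
-- stated objective: simpler
-- what changed: B drops the separate lifetime() rescan and the title()+replace() two-pass struct_name: one table-driven pass per message collects the lifetime flag and the field body together and builds each block as a single string, and struct_name title-cases while skipping underscores in one pass.
import Mathlib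
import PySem

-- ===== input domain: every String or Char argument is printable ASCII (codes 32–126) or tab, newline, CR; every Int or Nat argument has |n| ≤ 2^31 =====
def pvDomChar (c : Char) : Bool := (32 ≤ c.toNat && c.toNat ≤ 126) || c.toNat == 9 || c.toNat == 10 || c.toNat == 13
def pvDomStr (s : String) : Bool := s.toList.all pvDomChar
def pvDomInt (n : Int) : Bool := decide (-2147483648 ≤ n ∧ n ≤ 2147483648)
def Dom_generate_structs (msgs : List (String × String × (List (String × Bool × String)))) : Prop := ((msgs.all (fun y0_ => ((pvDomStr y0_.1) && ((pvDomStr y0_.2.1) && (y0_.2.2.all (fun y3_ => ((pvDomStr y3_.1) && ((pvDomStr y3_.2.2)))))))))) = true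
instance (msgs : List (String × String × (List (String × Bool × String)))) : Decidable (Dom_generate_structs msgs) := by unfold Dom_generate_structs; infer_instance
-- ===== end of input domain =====

-- B replaces A's title()+replace() two-pass struct_name and the separate lifetime() rescan by single passes
-- that build each message's block string directly (objective: simpler decomposition, same cost).
-- ===== PORT A =====

-- name.title(): hand-ported char-by-char (PySem has no title); exact on the printable-ASCII domain
def titleChars : Bool → List Char → List Char
  | _, [] => []
  | prev, c :: cs =>
    (if PySem.Chars.isalpha c then (if prev then PySem.Chars.lowerChar c else PySem.Chars.upperChar c) else c)
      :: titleChars (PySem.Chars.isalpha c) cs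

def struct_nameA (name : String) : String :=
  PySem.Str.replace (String.ofList (titleChars false name.toList)) "_" ""

-- rust_type; none = the ValueError branch
def rust_typeA (type_ : String) (optional : Bool) : Option String :=
  let r? : Option String :=
    if type_ == "string" then some "&'a [u8]"
    else if type_ == "integer" then some "i32"
    else if type_ == "data" then some "&'a [u8]"
    else if type_ == "integer_data" then some "IntegerData<'a>"
    else none
  match r? with
  | none => none
  | some result => if !optional then some result else some ("Option<" ++ result ++ ">")

def lifetimeA : List (String × Bool × String) → Option String
  | [] => some ""
  | (type_, _, _) :: rest =>
    match rust_typeA type_ false with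
    | none => none
    | some r => if PySem.Str.isIn "'a" r then some "<'a>" else lifetimeA rest

def membersLoopA : List String → List (String × Bool × String) → Option (List String)
  | acc, [] => some acc
  | acc, (type_, opt, name) :: rest =>
    match rust_typeA type_ opt with
    | none => none
    | some rt => membersLoopA (acc ++ ["        pub " ++ name ++ ": " ++ rt ++ ","]) rest

def msgsLoopA : List String → List (String × String × (List (String × Bool × String))) → Option (List String)
  | acc, [] => some acc
  | acc, (_, name, members) :: rest =>
    let acc1 := acc ++ ["    #[derive(Clone, Copy)]"]
    if !members.isEmpty then
      match lifetimeA members with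
      | none => none
      | some lt =>
        match membersLoopA (acc1 ++ ["    pub struct " ++ struct_nameA name ++ lt ++ " {"]) members with
        | none => none
        | some acc2 => msgsLoopA (acc2 ++ ["    }"] ++ [""]) rest
    else msgsLoopA (acc1 ++ ["    pub struct " ++ struct_nameA name ++ ";"] ++ [""]) rest

def generate_structs (msgs : List (String × String × (List (String × Bool × String)))) : String :=
  match msgsLoopA [] msgs with
  | some result => PySem.Str.join "\n" result
  | none => ""  -- unreachable under Pre_ (Python raises ValueError there)

-- ===== PORT B =====

def pyTYPES : PySem.Dict String String :=
  PySem.Dict.mk [("string", "&'a [u8]"), ("integer", "i32"),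
                 ("data", "&'a [u8]"), ("integer_data", "IntegerData<'a>")]

-- B's struct_name: one pass, title-casing while dropping underscores
def structNameAltGo : Bool → List Char → List Char
  | _, [] => []
  | prev, c :: cs =>
    if c == '_' then structNameAltGo false cs
    else if PySem.Chars.isalpha c then
      (if prev then PySem.Chars.lowerChar c else PySem.Chars.upperChar c) :: structNameAltGo true cs
    else c :: structNameAltGo false cs

def struct_nameAlt (name : String) : String := String.ofList (structNameAltGo false name.toList)

-- B's inner loop: lifetime flag and field body collected in one pass; none = KeyError
def fieldsLoopB : String → String → List (String × Bool × String) → Option (String × String)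
  | lt, body, [] => some (lt, body)
  | lt, body, (type_, opt, fname) :: rest =>
    match PySem.Dict.get? pyTYPES type_ with
    | none => none
    | some base =>
      let lt' := if PySem.Str.isIn "'a" base then "<'a>" else lt
      let ty := if opt then "Option<" ++ base ++ ">" else base
      fieldsLoopB lt' (body ++ ("        pub " ++ fname ++ ": " ++ ty ++ ",\n")) rest

def blocksB : List (String × String × (List (String × Bool × String))) → Option (List String)
  | [] => some []
  | (_, name, members) :: rest =>
    let sn := struct_nameAlt name
    let head := "    #[derive(Clone, Copy)]\n"
    if members.isEmpty then
      match blocksB rest with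
      | none => none
      | some bs => some ((head ++ "    pub struct " ++ sn ++ ";\n") :: bs)
    else
      match fieldsLoopB "" "" members with
      | none => none
      | some (lt, body) =>
        match blocksB rest with
        | none => none
        | some bs => some ((head ++ "    pub struct " ++ sn ++ lt ++ " {\n" ++ body ++ "    }\n") :: bs)

def generate_structs_alt (msgs : List (String × String × (List (String × Bool × String)))) : String :=
  match blocksB msgs with
  | some bs => PySem.Str.join "\n" bs
  | none => ""

-- ===== PRECONDITION & SPEC =====
def validType (t : String) : Bool :=
  t == "string" || t == "integer" || t == "data" || t == "integer_data"

-- Pre_ excludes exactly the inputs on which A raises ValueError (a member whose type string is invalid)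
def Pre_generate_structs (msgs : List (String × String × (List (String × Bool × String)))) : Prop :=
  (msgs.all fun m => m.2.2.all fun mem => validType mem.1) = true

instance (msgs : List (String × String × (List (String × Bool × String)))) : Decidable (Pre_generate_structs msgs) := by
  unfold Pre_generate_structs; infer_instance

def pvWitness_generate_structs : (List (String × String × (List (String × Bool × String)))) :=
  [("net", "info_captured", [("string", false, "name"), ("integer", true, "score")]),
   ("net", "pause", [])]

def Spec_generate_structs (msgs : List (String × String × (List (String × Bool × String)))) (out : String) : Prop := out = generate_structs_alt msgs
instance (msgs : List (String × String × (List (String × Bool × String)))) (out : String) : Decidable (Spec_generate_structs msgs out) := by unfold Spec_generate_structs; infer_instance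

-- ===== CLAIM (what is proved, stated in full; the proofs are below) =====
def Claim_equal_generate_structs : Prop := ∀ (msgs : List (String × String × (List (String × Bool × String)))), Dom_generate_structs msgs → Pre_generate_structs msgs → Spec_generate_structs msgs (generate_structs msgs)

-- ===== LEMMAS AND PROOFS =====

-- mapped title-case char of a letter is never '_'
lemma char_bounds {c d : Char} (h : c ≤ d) : c.toNat ≤ d.toNat := by
  rw [Char.le_def, UInt32.le_iff_toNat_le] at h; exact h
lemma mapped_ne_underscore (c : Char) (prev : Bool) (h : PySem.Chars.isalpha c = true) :
    (if prev then PySem.Chars.lowerChar c else PySem.Chars.upperChar c) ≠ '_' := by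
  simp only [PySem.Chars.isalpha, Bool.or_eq_true] at h
  have h95 : ('_').toNat = 95 := by decide
  intro hc
  have hT := congrArg Char.toNat hc
  rcases h with h | h
  · -- upper case letter: lowerChar c = c+32 ∈ [97,122]; upperChar c = c ∈ [65,90]
    simp only [PySem.Chars.isupper, Bool.and_eq_true, decide_eq_true_eq] at h
    have h1 := char_bounds h.1; have h2 := char_bounds h.2
    have hA : ('A').toNat = 65 := by decide
    have hZ : ('Z').toNat = 90 := by decide
    cases prev <;> simp only [if_true, if_false, Bool.false_eq_true] at hT
    · rw [PySem.Chars.upperChar, if_neg (by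
        simp only [PySem.Chars.islower, Bool.and_eq_true, decide_eq_true_eq, not_and]
        intro ha hz
        have h3 := char_bounds ha
        have hl : ('a').toNat = 97 := by decide
        omega)] at hT
      omega
    · rw [PySem.Chars.lowerChar, if_pos (by
        simp only [PySem.Chars.isupper, Bool.and_eq_true, decide_eq_true_eq]; exact h),
        Char.toNat_ofNat, if_pos (by unfold Nat.isValidChar; omega)] at hT
      omega
  · simp only [PySem.Chars.islower, Bool.and_eq_true, decide_eq_true_eq] at h
    have h1 := char_bounds h.1; have h2 := char_bounds h.2
    have ha : ('a').toNat = 97 := by decide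
    have hz : ('z').toNat = 122 := by decide
    cases prev <;> simp only [if_true, if_false, Bool.false_eq_true] at hT
    · rw [PySem.Chars.upperChar, if_pos (by
        simp only [PySem.Chars.islower, Bool.and_eq_true, decide_eq_true_eq]; exact h),
        Char.toNat_ofNat, if_pos (by unfold Nat.isValidChar; omega)] at hT
      omega
    · rw [PySem.Chars.lowerChar, if_neg (by
        simp only [PySem.Chars.isupper, Bool.and_eq_true, decide_eq_true_eq, not_and]
        intro hA' hZ'
        have h3 := char_bounds hZ'
        have hZZ : ('Z').toNat = 90 := by decide
        omega)] at hT
      omega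

-- replace with a 1-char pattern and empty replacement is filter
lemma replace_go_filter (c0 : Char) : ∀ (l acc : List Char) (fuel : Nat), l.length ≤ fuel →
    PySem.Chars.replace.go [c0] [] fuel l acc = acc.reverse ++ l.filter (fun c => c != c0) := by
  intro l
  induction l with
  | nil =>
    intro acc fuel _
    rw [PySem.Chars.replace.go.eq_def]
    cases fuel <;> simp
  | cons c cs ih =>
    intro acc fuel hf
    cases fuel with
    | zero => simp at hf
    | succ f =>
      rw [PySem.Chars.replace.go.eq_def]
      simp only [List.isPrefixOf, Bool.and_true, List.length_nil, List.drop_succ_cons,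
        List.drop_zero, List.reverse_nil, List.nil_append, List.length_cons] at *
      by_cases hc : c0 = c
      · subst hc
        rw [if_pos (by simp), ih acc f (by omega)]
        simp
      · rw [if_neg (by simp [hc]), ih (c :: acc) f (by omega)]
        simp [Ne.symm hc]
lemma replace_filter (s : List Char) (c0 : Char) :
    PySem.Chars.replace s [c0] [] = s.filter (fun c => c != c0) := by
  rw [PySem.Chars.replace]
  simp [replace_go_filter c0 s [] s.length le_rfl]

lemma title_filter : ∀ (l : List Char) (prev : Bool),
    (titleChars prev l).filter (fun c => c != '_') = structNameAltGo prev l := by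
  intro l
  induction l with
  | nil => intro prev; rfl
  | cons c cs ih =>
    intro prev
    by_cases hu : c = '_'
    · subst hu
      simp [titleChars, structNameAltGo, ih, show PySem.Chars.isalpha '_' = false by decide]
    · by_cases ha : PySem.Chars.isalpha c = true
      · simp [titleChars, structNameAltGo, hu, ha, ih, mapped_ne_underscore c prev ha]
      · simp at ha
        simp [titleChars, structNameAltGo, hu, ha, ih]

lemma struct_name_eq (name : String) : struct_nameA name = struct_nameAlt name := by
  rw [← String.toList_inj]
  simp only [struct_nameA, struct_nameAlt, PySem.Str.toList_replace, String.toList_ofList]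
  rw [show ("_" : String).toList = ['_'] from rfl, show ("" : String).toList = [] from rfl]
  rw [replace_filter, title_filter]

lemma rust_type_baseOf (t : String) (opt : Bool) :
    rust_typeA t opt = (PySem.Dict.get? pyTYPES t).map
      (fun base => if opt then "Option<" ++ base ++ ">" else base) := by
  by_cases h1 : t = "string"
  · subst h1; cases opt <;> rfl
  by_cases h2 : t = "integer"
  · subst h2; cases opt <;> rfl
  by_cases h3 : t = "data"
  · subst h3; cases opt <;> rfl
  by_cases h4 : t = "integer_data"
  · subst h4; cases opt <;> rfl
  unfold rust_typeA pyTYPES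
  simp only [PySem.Dict.get?_mk_cons, beq_iff_eq, h1, h2, h3, h4,
    Ne.symm h1, Ne.symm h2, Ne.symm h3, Ne.symm h4, if_false]
  rfl

-- spec-side views of the loops (proof helpers)
def baseD (t : String) : String := PySem.Dict.getD pyTYPES t ""

def hasLA (members : List (String × Bool × String)) : Bool :=
  members.any fun m => PySem.Str.isIn "'a" (baseD m.1)

def tyOf (m : String × Bool × String) : String :=
  if m.2.1 then "Option<" ++ baseD m.1 ++ ">" else baseD m.1

def lineOf (m : String × Bool × String) : String :=
  "        pub " ++ m.2.2 ++ ": " ++ tyOf m ++ ","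

def ValidM (members : List (String × Bool × String)) : Prop :=
  (members.all fun mem => validType mem.1) = true

lemma valid_get (t : String) (h : validType t = true) :
    PySem.Dict.get? pyTYPES t = some (baseD t) := by
  simp only [validType, Bool.or_eq_true, beq_iff_eq] at h
  rcases h with ((h | h) | h) | h <;> subst h <;> rfl

lemma lifetimeA_spec (members : List (String × Bool × String)) (h : ValidM members) :
    lifetimeA members = some (if hasLA members then "<'a>" else "") := by
  induction members with
  | nil => rfl
  | cons m rest ih =>
    obtain ⟨t, o, n⟩ := m
    rw [ValidM, List.all_cons, Bool.and_eq_true] at h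
    rw [lifetimeA, rust_type_baseOf t false, valid_get t h.1]
    rw [ih h.2]
    by_cases hla : PySem.Chars.isIn ['\'', 'a'] (baseD t).toList = true
    · simp [hla, hasLA]
    · simp only [Bool.not_eq_true] at hla
      cases hany : (rest.any fun m => PySem.Chars.isIn ['\'', 'a'] (baseD m.1).toList) <;>
        simp [hasLA, hla, hany]

-- B's field body as a single string
def bodyOf : List (String × Bool × String) → String
  | [] => ""
  | m :: rest => ("        pub " ++ m.2.2 ++ ": " ++ tyOf m ++ ",\n") ++ bodyOf rest

lemma membersLoopA_spec : ∀ (members : List (String × Bool × String)), ValidM members →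
    ∀ acc, membersLoopA acc members = some (acc ++ members.map lineOf) := by
  intro members
  induction members with
  | nil => intro _ acc; simp [membersLoopA]
  | cons m rest ih =>
    intro h acc
    obtain ⟨t, o, n⟩ := m
    rw [ValidM, List.all_cons, Bool.and_eq_true] at h
    rw [membersLoopA, rust_type_baseOf t o, valid_get t h.1]
    simp only [Option.map_some]
    rw [ih h.2]
    simp [lineOf, tyOf, List.append_assoc]

lemma fieldsLoopB_spec : ∀ (members : List (String × Bool × String)), ValidM members →
    ∀ lt0 body0, fieldsLoopB lt0 body0 members =
      some ((if hasLA members then "<'a>" else lt0), body0 ++ bodyOf members) := by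
  intro members
  induction members with
  | nil => intro _ lt0 body0; simp [fieldsLoopB, bodyOf, hasLA]
  | cons m rest ih =>
    intro h lt0 body0
    obtain ⟨t, o, n⟩ := m
    rw [ValidM, List.all_cons, Bool.and_eq_true] at h
    rw [fieldsLoopB, valid_get t h.1]
    simp only
    rw [ih h.2]
    refine congrArg some (Prod.ext ?_ ?_)
    · by_cases hla : PySem.Chars.isIn ['\'', 'a'] (baseD t).toList = true
      · simp [hasLA, hla]
      · simp only [Bool.not_eq_true] at hla
        cases hany : (rest.any fun m => PySem.Chars.isIn ['\'', 'a'] (baseD m.1).toList) <;>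
          simp [hasLA, hla, hany]
    · simp [bodyOf, tyOf, String.append_assoc]

-- per-message line list of A
def msgLines (m : String × String × (List (String × Bool × String))) : List String :=
  "    #[derive(Clone, Copy)]" ::
  (if m.2.2.isEmpty then ["    pub struct " ++ struct_nameA m.2.1 ++ ";", ""]
   else ("    pub struct " ++ struct_nameA m.2.1 ++ (if hasLA m.2.2 then "<'a>" else "") ++ " {")
        :: m.2.2.map lineOf ++ ["    }", ""])

lemma msgsLoopA_spec : ∀ (msgs : List (String × String × (List (String × Bool × String)))),
    Pre_generate_structs msgs →
    ∀ acc, msgsLoopA acc msgs = some (acc ++ msgs.flatMap msgLines) := by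
  intro msgs
  induction msgs with
  | nil => intro _ acc; simp [msgsLoopA]
  | cons m rest ih =>
    intro hpre acc
    obtain ⟨mt, name, members⟩ := m
    rw [Pre_generate_structs, List.all_cons, Bool.and_eq_true] at hpre
    rw [msgsLoopA]
    cases he : members.isEmpty
    · simp only [Bool.not_false, if_pos]
      rw [lifetimeA_spec members hpre.1]
      dsimp only
      rw [membersLoopA_spec members hpre.1]
      dsimp only
      rw [ih hpre.2]
      simp [msgLines, he, List.append_assoc]
    · simp only [Bool.not_true, Bool.false_eq_true, if_false]
      rw [ih hpre.2]
      simp [msgLines, he, List.append_assoc]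

lemma intercalate_cons_of_ne {α : Type} (sep x : List α) (ys : List (List α)) (h : ys ≠ []) :
    sep.intercalate (x :: ys) = x ++ sep ++ sep.intercalate ys := by
  cases ys with
  | nil => exact absurd rfl h
  | cons y ys' => simp [List.intercalate]

lemma strJoin_cons (sep x : String) (ys : List String) (h : ys ≠ []) :
    PySem.Str.join sep (x :: ys) = x ++ sep ++ PySem.Str.join sep ys := by
  rw [← String.toList_inj]
  simp only [PySem.Str.toList_join, PySem.Chars.join, List.map_cons, String.toList_append]
  rw [intercalate_cons_of_ne _ _ _ (by simpa using h)]

lemma join_body : ∀ ms : List (String × Bool × String),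
    PySem.Str.join "\n" (ms.map lineOf ++ ["    }", ""]) = bodyOf ms ++ "    }\n" := by
  intro ms
  induction ms with
  | nil => rfl
  | cons m rest ih =>
    rw [List.map_cons, List.cons_append, strJoin_cons _ _ _ (by simp), ih]
    simp [lineOf, bodyOf, String.append_assoc, show ("," : String) ++ "\n" = ",\n" from rfl]

lemma joinA_block_empty (name : String) :
    PySem.Str.join "\n" ["    #[derive(Clone, Copy)]", "    pub struct " ++ struct_nameA name ++ ";", ""] =
    "    #[derive(Clone, Copy)]\n" ++ "    pub struct " ++ struct_nameAlt name ++ ";\n" := by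
  rw [← struct_name_eq]
  rw [strJoin_cons _ _ _ (by simp), strJoin_cons _ _ _ (by simp)]
  simp only [show PySem.Str.join "\n" [""] = "" from rfl, String.append_empty,
    String.append_assoc, show (";" : String) ++ "\n" = ";\n" from rfl]
  rw [← String.append_assoc,
    show ("    #[derive(Clone, Copy)]" : String) ++ "\n" = "    #[derive(Clone, Copy)]\n" from rfl]

lemma joinA_block_nonempty (name : String) (members : List (String × Bool × String)) (lt : String) :
    PySem.Str.join "\n" ("    #[derive(Clone, Copy)]" ::
      ("    pub struct " ++ struct_nameA name ++ lt ++ " {") :: (members.map lineOf ++ ["    }", ""])) =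
    "    #[derive(Clone, Copy)]\n" ++ "    pub struct " ++ struct_nameAlt name ++ lt ++ " {\n" ++
      bodyOf members ++ "    }\n" := by
  rw [← struct_name_eq]
  rw [strJoin_cons _ _ _ (by simp), strJoin_cons _ _ _ (by simp), join_body]
  simp only [String.append_assoc, show (" {" : String) ++ "\n" = " {\n" from rfl]
  rw [← String.append_assoc,
    show ("    #[derive(Clone, Copy)]" : String) ++ "\n" = "    #[derive(Clone, Copy)]\n" from rfl]

lemma blocksB_spec : ∀ (msgs : List (String × String × (List (String × Bool × String)))),
    Pre_generate_structs msgs →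
    blocksB msgs = some (msgs.map fun m => PySem.Str.join "\n" (msgLines m)) := by
  intro msgs
  induction msgs with
  | nil => intro _; rfl
  | cons m rest ih =>
    intro hpre
    obtain ⟨mt, name, members⟩ := m
    rw [Pre_generate_structs, List.all_cons, Bool.and_eq_true] at hpre
    rw [blocksB]
    cases he : members.isEmpty
    · simp only [Bool.false_eq_true, if_false]
      rw [fieldsLoopB_spec members hpre.1]
      dsimp only
      rw [ih hpre.2]
      simp only [List.map_cons]
      refine congrArg some (congrArg (· :: _) ?_)
      rw [show msgLines (mt, name, members) = "    #[derive(Clone, Copy)]" ::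
        ("    pub struct " ++ struct_nameA name ++ (if hasLA members then "<'a>" else "") ++ " {")
          :: (members.map lineOf ++ ["    }", ""]) by simp [msgLines, he]]
      rw [joinA_block_nonempty]
      simp
    · simp only [if_pos]
      rw [ih hpre.2]
      simp only [List.map_cons]
      refine congrArg some (congrArg (· :: _) ?_)
      rw [show msgLines (mt, name, members) = ["    #[derive(Clone, Copy)]",
        "    pub struct " ++ struct_nameA name ++ ";", ""] by simp [msgLines, he]]
      rw [joinA_block_empty]

lemma intercalate_append_of_ne {α : Type} (sep : List α) :
    ∀ (xs ys : List (List α)), xs ≠ [] → ys ≠ [] →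
      sep.intercalate (xs ++ ys) = sep.intercalate xs ++ sep ++ sep.intercalate ys := by
  intro xs
  induction xs with
  | nil => intro ys h _; exact absurd rfl h
  | cons x xs ih =>
    intro ys _ hy
    cases xs with
    | nil => rw [List.singleton_append, intercalate_cons_of_ne _ _ _ hy]; simp [List.intercalate]
    | cons x' xs' =>
      rw [List.cons_append, intercalate_cons_of_ne _ _ _ (by simp),
        intercalate_cons_of_ne _ _ _ (by simp), ih _ (by simp) hy]
      simp [List.append_assoc]

lemma intercalate_flatten {α : Type} (sep : List α) :
    ∀ (ls : List (List (List α))), (∀ l ∈ ls, l ≠ []) →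
      sep.intercalate ls.flatten = sep.intercalate (ls.map sep.intercalate) := by
  intro ls
  induction ls with
  | nil => intro _; rfl
  | cons l ls ih =>
    intro h
    cases ls with
    | nil => simp [List.intercalate]
    | cons l2 ls2 =>
      have h2 : l2 ≠ [] := h l2 (by simp)
      have hfl : (l2 :: ls2).flatten ≠ [] := by
        cases l2 with
        | nil => exact absurd rfl h2
        | cons a t => simp
      rw [List.flatten_cons, intercalate_append_of_ne sep l _ (h l (by simp)) hfl,
        ih (fun x hx => h x (by simp [hx])),
        show List.map sep.intercalate (l :: l2 :: ls2)
          = sep.intercalate l :: List.map sep.intercalate (l2 :: ls2) from rfl,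
        intercalate_cons_of_ne _ _ _ (by simp)]

lemma join_flatMap_eq (msgs : List (String × String × (List (String × Bool × String)))) :
    PySem.Str.join "\n" (msgs.flatMap msgLines) =
    PySem.Str.join "\n" (msgs.map fun m => PySem.Str.join "\n" (msgLines m)) := by
  rw [← String.toList_inj]
  simp only [PySem.Str.toList_join, PySem.Chars.join, List.map_map]
  rw [show List.map String.toList (msgs.flatMap msgLines)
      = (msgs.map fun m => (msgLines m).map String.toList).flatten by
    simp [List.flatMap_def, Function.comp_def]]
  rw [intercalate_flatten _ _ (by
    intro l hl
    simp only [List.mem_map] at hl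
    obtain ⟨m, _, rfl⟩ := hl
    simp [msgLines])]
  simp [List.map_map, Function.comp_def, PySem.Chars.join]

-- ===== VERDICT (by name: the statement is the Claim_ definition above) =====
theorem generate_structs_spec : Claim_equal_generate_structs := by
  intro msgs _ hpre
  unfold Spec_generate_structs generate_structs generate_structs_alt
  rw [msgsLoopA_spec msgs hpre [], blocksB_spec msgs hpre]
  simpa using join_flatMap_eq msgs
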